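-- pv_equiv track=rewrite | github.com/paiml/depyler | examples/hard_sci_chem_stoichiometry.py | empirical_ratio
-- ===== SOURCE A (Python) =====
-- def empirical_ratio(element_a: int, element_b: int) -> int:
--     """Simplify ratio a:b by GCD. Returns encoded ratio a*1000+b."""
--     a: int = element_a
--     b: int = element_b
--     if a <= 0 or b <= 0:
--         return 0
--     temp_a: int = a
--     temp_b: int = b
--     while temp_b != 0:
--         remainder: int = temp_a % temp_b
--         temp_a = temp_b
--         temp_b = remainder
--     gcd_val: int = temp_a
--     if gcd_val == 0:
--         return 0
--     ratio_a: int = a // gcd_val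
--     ratio_b: int = b // gcd_val
--     return ratio_a * 1000 + ratio_b
-- ===== SOURCE B (Python) =====
-- def _bin_gcd(x, y):
--     """Binary (Stein) GCD for x > 0, y >= 0."""
--     if y == 0:
--         return x
--     if x % 2 == 0 and y % 2 == 0:
--         return 2 * _bin_gcd(x // 2, y // 2)
--     if x % 2 == 0:
--         return _bin_gcd(x // 2, y)
--     if y % 2 == 0:
--         return _bin_gcd(x, y // 2)
--     if x > y:
--         return _bin_gcd(y, x - y)
--     return _bin_gcd(x, y - x)
--
--
-- def empirical_ratio(element_a: int, element_b: int) -> int: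
--     """Simplify ratio a:b by GCD. Returns encoded ratio a*1000+b."""
--     if element_a <= 0 or element_b <= 0:
--         return 0
--     g = _bin_gcd(element_a, element_b)
--     return (element_a // g) * 1000 + (element_b // g)
-- ===== Notes on version B (the rewrite author's own statement) =====
-- stated objective: alternative
-- what changed: Replaces the iterative modulo-based Euclidean loop with a recursive binary (Stein) GCD that uses only halving, parity tests and subtraction, and drops the dead gcd==0 guard.
import Mathlib
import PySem

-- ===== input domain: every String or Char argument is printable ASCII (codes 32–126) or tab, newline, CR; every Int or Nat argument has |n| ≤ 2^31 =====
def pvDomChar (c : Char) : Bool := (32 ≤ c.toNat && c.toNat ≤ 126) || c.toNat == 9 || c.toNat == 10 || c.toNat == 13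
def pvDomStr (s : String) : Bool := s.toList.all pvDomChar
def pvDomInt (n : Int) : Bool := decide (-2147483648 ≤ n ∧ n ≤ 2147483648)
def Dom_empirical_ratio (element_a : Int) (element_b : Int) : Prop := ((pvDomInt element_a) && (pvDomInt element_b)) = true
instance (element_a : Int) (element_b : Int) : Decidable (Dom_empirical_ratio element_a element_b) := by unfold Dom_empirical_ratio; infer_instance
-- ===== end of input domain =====

-- B replaces A's iterative modulo-based Euclidean loop by a recursive binary (Stein) GCD
-- built from halving, parity tests and subtraction, and drops A's dead `gcd_val == 0` guard
-- (objective: alternative algorithm of similar cost).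

-- ===== PORT A =====
-- termination lemma for A's while loop (cited by `decreasing_by`)
lemma pyMod_natAbs_lt (ta tb : Int) (h : ¬ tb = 0) :
    (PySem.Int.mod ta tb).natAbs < tb.natAbs := by
  rcases lt_or_gt_of_ne h with hneg | hpos
  · have := PySem.Int.mod_neg_bounds (a := ta) hneg; omega
  · have h1 := PySem.Int.mod_nonneg (a := ta) hpos
    have h2 := PySem.Int.mod_lt (a := ta) hpos; omega

-- the `while temp_b != 0` loop of A, state (temp_a, temp_b)
def euclidLoop (temp_a temp_b : Int) : Int :=
  if h : temp_b = 0 then temp_a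
  else euclidLoop temp_b (PySem.Int.mod temp_a temp_b)
termination_by temp_b.natAbs
decreasing_by exact pyMod_natAbs_lt temp_a temp_b h

def empirical_ratio (element_a : Int) (element_b : Int) : Int :=
  let a := element_a
  let b := element_b
  if a ≤ 0 ∨ b ≤ 0 then 0
  else
    let gcd_val := euclidLoop a b
    if gcd_val = 0 then 0
    else
      let ratio_a := PySem.Int.floordiv a gcd_val
      let ratio_b := PySem.Int.floordiv b gcd_val
      ratio_a * 1000 + ratio_b

-- ===== PORT B =====
-- _bin_gcd from Source B; fueled because the raw recursion diverges on (irrelevant) negative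
-- inputs — the fuel seeded at the call site is a totality guard only, never exhausted on
-- the positive arguments B actually passes.
def binGcd (fuel : Nat) (x y : Int) : Int :=
  match fuel with
  | 0 => x
  | fuel + 1 =>
    if y = 0 then x
    else if PySem.Int.mod x 2 = 0 ∧ PySem.Int.mod y 2 = 0 then
      2 * binGcd fuel (PySem.Int.floordiv x 2) (PySem.Int.floordiv y 2)
    else if PySem.Int.mod x 2 = 0 then binGcd fuel (PySem.Int.floordiv x 2) y
    else if PySem.Int.mod y 2 = 0 then binGcd fuel x (PySem.Int.floordiv y 2)
    else if x > y then binGcd fuel y (x - y)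
    else binGcd fuel x (y - x)

def empirical_ratio_alt (element_a : Int) (element_b : Int) : Int :=
  if element_a ≤ 0 ∨ element_b ≤ 0 then 0
  else
    let g := binGcd (element_a.natAbs + element_b.natAbs + 1) element_a element_b
    PySem.Int.floordiv element_a g * 1000 + PySem.Int.floordiv element_b g

-- ===== PRECONDITION & SPEC =====
def Spec_empirical_ratio (element_a : Int) (element_b : Int) (out : Int) : Prop := out = empirical_ratio_alt element_a element_b
instance (element_a : Int) (element_b : Int) (out : Int) : Decidable (Spec_empirical_ratio element_a element_b out) := by unfold Spec_empirical_ratio; infer_instance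

-- ===== CLAIM (what is proved, stated in full; the proofs are below) =====
def Claim_equal_empirical_ratio : Prop := ∀ (element_a : Int) (element_b : Int), Dom_empirical_ratio element_a element_b → Spec_empirical_ratio element_a element_b (empirical_ratio element_a element_b)

-- ===== LEMMAS AND PROOFS =====

-- A's loop computes the gcd
lemma euclidLoop_eq (n : Nat) : ∀ (ta tb : Int), tb.natAbs ≤ n → 0 ≤ ta → 0 ≤ tb →
    euclidLoop ta tb = Int.ofNat (Nat.gcd tb.toNat ta.toNat) := by
  induction n with
  | zero =>
    intro ta tb hn hta htb
    have h0 : tb = 0 := by omega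
    rw [euclidLoop]
    simp [h0, Int.toNat_of_nonneg hta]
  | succ n ih =>
    intro ta tb hn hta htb
    rw [euclidLoop]
    by_cases h0 : tb = 0
    · simp [h0, Int.toNat_of_nonneg hta]
    · have hpos : 0 < tb := by omega
      have hm := PySem.Int.mod_eq_emod_of_pos (a := ta) hpos
      have hr0 : 0 ≤ ta % tb := Int.emod_nonneg ta h0
      have hrlt : ta % tb < tb := Int.emod_lt_of_pos ta hpos
      simp only [h0, dif_neg, not_false_iff, hm]
      have ht : (ta % tb).toNat = ta.toNat % tb.toNat := by
        have h1 : ta % tb = ((ta.toNat % tb.toNat : Nat) : Int) := by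
          rw [← Int.toNat_of_nonneg hta, ← Int.toNat_of_nonneg htb]
          push_cast; rfl
        rw [h1, Int.toNat_natCast]
      have hbound : (ta % tb).natAbs ≤ n := by omega
      rw [ih tb (ta % tb) hbound htb hr0, ht, ← Nat.gcd_rec]

-- B's binary gcd computes the gcd (enough fuel, positive x, nonneg y)
lemma binGcd_eq : ∀ (fuel : Nat) (x y : Int), 0 < x → 0 ≤ y → x.toNat + y.toNat ≤ fuel →
    binGcd fuel x y = Int.ofNat (Nat.gcd x.toNat y.toNat) := by
  intro fuel
  induction fuel with
  | zero => intro x y hx hy hf; omega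
  | succ f ih =>
    intro x y hx hy hf
    simp only [binGcd]
    have h2 : (0:Int) < 2 := by norm_num
    rw [PySem.Int.mod_eq_emod_of_pos (a := x) h2, PySem.Int.mod_eq_emod_of_pos (a := y) h2,
        PySem.Int.floordiv_eq_ediv_of_pos (a := x) h2, PySem.Int.floordiv_eq_ediv_of_pos (a := y) h2]
    split_ifs with hy0 hee hxe hye hgt
    · -- y == 0
      simp [hy0, Int.toNat_of_nonneg (le_of_lt hx)]
    · -- both even
      obtain ⟨hxm, hym⟩ := hee
      have e1 : (x / 2).toNat = x.toNat / 2 := by omega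
      have e2 : (y / 2).toNat = y.toNat / 2 := by omega
      rw [ih (x / 2) (y / 2) (by omega) (by omega) (by omega)]
      have hg : Nat.gcd x.toNat y.toNat = 2 * Nat.gcd (x.toNat / 2) (y.toNat / 2) := by
        conv_lhs => rw [show x.toNat = 2 * (x.toNat / 2) by omega,
                        show y.toNat = 2 * (y.toNat / 2) by omega]
        exact Nat.gcd_mul_left 2 _ _
      rw [e1, e2, hg]; simp [Int.ofNat_eq_natCast]
    · -- x even, y odd
      have e1 : (x / 2).toNat = x.toNat / 2 := by omega
      rw [ih (x / 2) y (by omega) hy (by omega), e1]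
      have hcop : Nat.Coprime 2 y.toNat := Nat.coprime_two_left.mpr (Nat.odd_iff.mpr (by omega))
      have hg2 : (x.toNat / 2).gcd y.toNat = x.toNat.gcd y.toNat := by
        conv_rhs => rw [show x.toNat = 2 * (x.toNat / 2) by omega]
        exact (Nat.Coprime.gcd_mul_left_cancel _ hcop).symm
      rw [hg2]
    · -- x odd, y even
      have e2 : (y / 2).toNat = y.toNat / 2 := by omega
      rw [ih x (y / 2) hx (by omega) (by omega), e2]
      have hcop : Nat.Coprime 2 x.toNat := Nat.coprime_two_left.mpr (Nat.odd_iff.mpr (by omega))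
      have hg2 : x.toNat.gcd (y.toNat / 2) = x.toNat.gcd y.toNat := by
        conv_rhs => rw [show y.toNat = 2 * (y.toNat / 2) by omega]
        exact (Nat.Coprime.gcd_mul_left_cancel_right _ hcop).symm
      rw [hg2]
    · -- both odd, x > y
      have e1 : (x - y).toNat = x.toNat - y.toNat := by omega
      rw [ih y (x - y) (by omega) (by omega) (by omega), e1]
      rw [Nat.gcd_sub_self_right (by omega), Nat.gcd_comm]
    · -- both odd, x ≤ y
      have e1 : (y - x).toNat = y.toNat - x.toNat := by omega
      rw [ih x (y - x) hx (by omega) (by omega), e1]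
      rw [Nat.gcd_sub_self_right (by omega)]

-- ===== VERDICT (by name: the statement is the Claim_ definition above) =====
theorem empirical_ratio_spec : Claim_equal_empirical_ratio := by
  intro a b _
  unfold Spec_empirical_ratio empirical_ratio empirical_ratio_alt
  by_cases hneg : a ≤ 0 ∨ b ≤ 0
  · simp [hneg]
  · have ha : 0 < a := by omega
    have hb : 0 < b := by omega
    have hA := euclidLoop_eq b.natAbs a b le_rfl (le_of_lt ha) (le_of_lt hb)
    have hB := binGcd_eq (a.natAbs + b.natAbs + 1) a b ha (le_of_lt hb) (by omega)
    have hg0 : Nat.gcd a.toNat b.toNat ≠ 0 := by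
      intro h
      have := Nat.eq_zero_of_gcd_eq_zero_left h
      omega
    simp only [hneg, if_false, hA, hB, Nat.gcd_comm b.toNat a.toNat]
    rw [if_neg (show ¬ Int.ofNat (a.toNat.gcd b.toNat) = 0 by rw [Int.ofNat_eq_natCast]; exact_mod_cast hg0)]
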